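-- pv_equiv track=rewrite | github.com/thunderbump/Rosalind | 21_sign/sign.py | sign_permute
-- ===== SOURCE A (Python) =====
-- def sign_permute(target_list):
--     returned_perms = []
--     index = 0
--     while index < 2 ** len(target_list):
--         scratch_list = list(target_list)
--         for bit_index, element in enumerate(target_list):
--             if index & (2 ** bit_index) != 0:
--                 scratch_list[bit_index] *= -1
--         returned_perms.append(scratch_list)
--         index += 1
--     return returned_perms
-- ===== SOURCE B (Python) =====
-- def sign_permute(target_list):
--     if not target_list:
--         return [[]]
--     head = target_list[0]
--     tails = sign_permute(target_list[1:])
--     out = []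
--     for tail in tails:
--         out.append([head] + tail)
--         out.append([-head] + tail)
--     return out
-- ===== Notes on version B (the rewrite author's own statement) =====
-- stated objective: alternative
-- what changed: Replaces the integer-counter-with-bitmask enumeration (for each index in range(2**n), scan all bits and negate flagged positions) by a structural recursion: build the sign variations of the tail once and prepend +head/-head to each, with head varying fastest to preserve A's order.
import Mathlib
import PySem

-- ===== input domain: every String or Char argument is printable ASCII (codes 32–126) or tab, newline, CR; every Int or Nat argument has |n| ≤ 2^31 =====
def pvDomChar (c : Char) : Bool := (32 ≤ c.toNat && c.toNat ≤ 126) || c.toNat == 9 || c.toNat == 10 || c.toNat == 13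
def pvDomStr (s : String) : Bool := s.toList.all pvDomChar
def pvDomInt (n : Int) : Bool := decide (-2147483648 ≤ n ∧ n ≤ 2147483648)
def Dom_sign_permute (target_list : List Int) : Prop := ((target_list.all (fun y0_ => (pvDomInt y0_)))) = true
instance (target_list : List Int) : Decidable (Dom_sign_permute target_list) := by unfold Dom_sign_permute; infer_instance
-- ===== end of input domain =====

-- B replaces A's integer counter + bitmask scan by a structural recursion on the list
-- (prepend +head/-head to each sign variation of the tail); return value only, no mutation.

-- ===== PORT A =====
-- literal transliteration of A's while/for loops; 'scratch_list[bit_index] *= -1' is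
-- pyGetD/pySetD (exact here: enumerate indices are always in range), '2 ** bit_index'
-- is (2 : Int) ^ toNat of the index (exact: enumerate indices are nonnegative),
-- 'index & m != 0' is PySem.Int.band.
def sign_permute (target_list : List Int) : List (List Int) :=
  (PySem.List.pyRange 0 ((2 : Int) ^ target_list.length) 1).foldl
    (fun returned_perms index =>
      let scratch_list :=
        (PySem.List.enumerate target_list).foldl
          (fun s p =>
            if PySem.Int.band index ((2 : Int) ^ p.1.toNat) ≠ 0 then
              PySem.List.pySetD s p.1 (PySem.List.pyGetD s p.1 0 * (-1))
            else s)
          target_list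
      returned_perms ++ [scratch_list])
    []

-- ===== PORT B =====
-- literal transliteration of Source B: recursion on the tail, then a loop appending
-- [head]+tail and [-head]+tail for each tail variation.
def sign_permute_alt : List Int → List (List Int)
  | [] => [[]]
  | head :: rest =>
    (sign_permute_alt rest).foldl
      (fun out tail => (out ++ [head :: tail]) ++ [(-head) :: tail]) []

-- ===== PRECONDITION & SPEC =====
def Spec_sign_permute (target_list : List Int) (out : List (List Int)) : Prop := out = sign_permute_alt target_list
instance (target_list : List Int) (out : List (List Int)) : Decidable (Spec_sign_permute target_list out) := by unfold Spec_sign_permute; infer_instance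

-- ===== CLAIM (what is proved, stated in full; the proofs are below) =====
def Claim_equal_sign_permute : Prop := ∀ (target_list : List Int), Dom_sign_permute target_list → Spec_sign_permute target_list (sign_permute target_list)

-- ===== LEMMAS AND PROOFS =====

-- the common specification: row k of the output flips position i iff bit i of k is set
def specRow (k : Nat) : List Int → List Int
  | [] => []
  | x :: xs => (if k % 2 = 1 then -x else x) :: specRow (k / 2) xs

def specAll (t : List Int) : List (List Int) :=
  (List.range (2 ^ t.length)).map (fun k => specRow k t)

theorem foldl_append_two {α β : Type} (f g : α → β) :
    ∀ (l : List α) (acc : List β),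
      l.foldl (fun out tail => (out ++ [f tail]) ++ [g tail]) acc
        = acc ++ l.flatMap (fun tail => [f tail, g tail]) := by
  intro l
  induction l with
  | nil => simp
  | cons x xs ih => intro acc; simp [List.flatMap_def]

theorem range_two_mul_flatMap :
    ∀ m : Nat, List.range (2 * m) = (List.range m).flatMap (fun j => [2 * j, 2 * j + 1]) := by
  intro m
  induction m with
  | zero => simp
  | succ n ih =>
    have h : 2 * (n + 1) = (2 * n + 1) + 1 := by omega
    rw [h, List.range_succ, List.range_succ, List.range_succ, ih]
    simp

theorem alt_eq_specAll : ∀ t : List Int, sign_permute_alt t = specAll t := by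
  intro t
  induction t with
  | nil => rfl
  | cons x xs ih =>
    rw [sign_permute_alt, ih, specAll, specAll]
    rw [foldl_append_two]
    have hlen : 2 ^ (x :: xs).length = 2 * 2 ^ xs.length := by
      simp [List.length_cons, pow_succ]; ring
    rw [hlen, range_two_mul_flatMap, List.map_flatMap, List.flatMap_map]
    simp only [List.nil_append]
    congr 1
    funext j
    have h1 : specRow (2 * j) (x :: xs) = x :: specRow j xs := by
      simp [specRow, Nat.mul_div_cancel_left j (by norm_num : 0 < 2), Nat.mul_mod_right]
    have h2 : specRow (2 * j + 1) (x :: xs) = (-x) :: specRow j xs := by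
      have : (2 * j + 1) / 2 = j := by omega
      simp [specRow, this]
    simp [h1, h2]

-- bit test: k & 2^j ≠ 0 ↔ (k / 2^j) % 2 = 1
theorem and_pow_ne_zero (k j : Nat) : (k &&& 2 ^ j ≠ 0) ↔ (k / 2 ^ j) % 2 = 1 := by
  rw [Nat.and_two_pow]
  rcases h : k.testBit j with _ | _ <;>
    simp_all [Nat.testBit_eq_decide_div_mod_eq, Nat.pow_eq_zero]

-- the inner enumerate-fold of A, generalized over a processed prefix
theorem inner_fold (k : Nat) :
    ∀ (xs pre : List Int),
      (PySem.List.enumerate xs (pre.length : Int)).foldl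
          (fun s p =>
            if PySem.Int.band ((k : Nat) : Int) ((2 : Int) ^ p.1.toNat) ≠ 0 then
              PySem.List.pySetD s p.1 (PySem.List.pyGetD s p.1 0 * (-1))
            else s)
          (pre ++ xs)
        = pre ++ specRow (k / 2 ^ pre.length) xs := by
  intro xs
  induction xs with
  | nil => intro pre; simp [PySem.List.enumerate_nil, specRow]
  | cons x rest ih =>
    intro pre
    rw [PySem.List.enumerate_cons, List.foldl_cons]
    have hband : PySem.Int.band ((k : Nat) : Int) ((2 : Int) ^ ((pre.length : Int)).toNat)
        = ((k &&& 2 ^ pre.length : Nat) : Int) := by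
      rw [show ((2 : Int) ^ ((pre.length : Int)).toNat) = ((2 ^ pre.length : Nat) : Int) by
            push_cast [Int.toNat_natCast]; ring]
      exact PySem.Int.band_natCast k (2 ^ pre.length)
    have hget : PySem.List.pyGetD (pre ++ x :: rest) (pre.length : Int) 0 = x := by
      rw [PySem.List.pyGetD_natCast]
      simp [List.getD_eq_getElem?_getD]
    have hset : ∀ v : Int,
        PySem.List.pySetD (pre ++ x :: rest) (pre.length : Int) v = pre ++ v :: rest := by
      intro v
      rw [PySem.List.pySetD_natCast]
      rw [List.set_append_right _ _ (le_refl pre.length)]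
      simp
    have hx : (if PySem.Int.band ((k : Nat) : Int) ((2 : Int) ^ ((pre.length : Int)).toNat) ≠ 0
          then PySem.List.pySetD (pre ++ x :: rest) (pre.length : Int)
                 (PySem.List.pyGetD (pre ++ x :: rest) (pre.length : Int) 0 * (-1))
          else pre ++ x :: rest)
        = pre ++ (if (k / 2 ^ pre.length) % 2 = 1 then -x else x) :: rest := by
      rw [hband, hget]
      by_cases hb : (k / 2 ^ pre.length) % 2 = 1
      · rw [if_pos (by exact_mod_cast (and_pow_ne_zero k pre.length).mpr hb), hset]
        simp [hb]
      · rw [if_neg (by simpa [and_pow_ne_zero k pre.length] using hb)]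
        simp [hb]
    have hrow : specRow (k / 2 ^ pre.length) (x :: rest)
        = (if k / 2 ^ pre.length % 2 = 1 then -x else x)
            :: specRow (k / 2 ^ (pre.length + 1)) rest := by
      rw [specRow]
      congr 1
      rw [pow_succ, ← Nat.div_div_eq_div_mul]
    rw [hx, hrow]
    have h2 := ih (pre ++ [(if k / 2 ^ pre.length % 2 = 1 then -x else x)])
    simpa using h2

theorem foldl_append_one {α β : Type} (f : α → β) :
    ∀ (l : List α) (acc : List β),
      l.foldl (fun out a => out ++ [f a]) acc = acc ++ l.map f := by
  intro l
  induction l with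
  | nil => simp
  | cons x xs ih => intro acc; simp [ih]

theorem a_eq_specAll : ∀ t : List Int, sign_permute t = specAll t := by
  intro t
  rw [sign_permute, specAll, PySem.List.pyRange_one]
  have h2 : (((2 : Int) ^ t.length - 0)).toNat = 2 ^ t.length := by
    rw [sub_zero, show ((2 : Int) ^ t.length) = ((2 ^ t.length : Nat) : Int) by push_cast; ring,
        Int.toNat_natCast]
  rw [h2, List.foldl_map]
  rw [foldl_append_one]
  simp only [List.nil_append]
  apply List.map_congr_left
  intro k _
  have h := inner_fold k t []
  simpa using h

-- ===== VERDICT (by name: the statement is the Claim_ definition above) =====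
theorem sign_permute_spec : Claim_equal_sign_permute := by
  intro t _
  unfold Spec_sign_permute
  rw [a_eq_specAll, alt_eq_specAll]
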